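-- pv_equiv track=rewrite | github.com/jmetzz/sandbox-python | src/leetcode/p_1043_partition_array_for_max_sum.py | solve_dfs_list_memo
-- ===== SOURCE A (Python) =====
-- from typing import List
--
-- def solve_dfs_list_memo(arr: List[int], k: int) -> int:
--     table = [-1] * len(arr)  # -1 indicates the answer is not calculated yet
--
--     def _dfs(start_idx: int) -> int:
--         if start_idx >= len(arr):
--             # base case -- which is made redundant because of the
--             # min(n, i + k) in the loop control
--             return 0
--
--         if table[start_idx] != -1:
--             return table[start_idx]
--
--         curr_max = 0
--         answer = 0
--         end_idx = min(start_idx + k, len(arr))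
--         for idx in range(start_idx, end_idx):
--             curr_max = max(curr_max, arr[idx])
--             answer = max(answer, curr_max * (idx - start_idx + 1) + _dfs(idx + 1))
--
--         table[start_idx] = answer
--         return answer
--
--     return _dfs(0)
-- ===== SOURCE B (Python) =====
-- from typing import List
--
-- def solve_dfs_list_memo(arr: List[int], k: int) -> int:
--     n = len(arr)
--     dp = [0]  # dp[j] holds the answer for suffix start i+j (built back-to-front)
--     for i in range(n - 1, -1, -1):
--         curr_max = 0
--         best = 0
--         for length in range(1, min(k, n - i) + 1):
--             curr_max = max(curr_max, arr[i + length - 1])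
--             best = max(best, curr_max * length + dp[length - 1])
--         dp.insert(0, best)
--     return dp[0]
-- ===== Notes on version B (the rewrite author's own statement) =====
-- stated objective: simpler
-- what changed: Replaced the top-down recursive _dfs with a -1-sentinel memo table by a bottom-up iterative DP that builds the suffix-answer list back-to-front (no recursion, no memo table, no sentinel).
import Mathlib
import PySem

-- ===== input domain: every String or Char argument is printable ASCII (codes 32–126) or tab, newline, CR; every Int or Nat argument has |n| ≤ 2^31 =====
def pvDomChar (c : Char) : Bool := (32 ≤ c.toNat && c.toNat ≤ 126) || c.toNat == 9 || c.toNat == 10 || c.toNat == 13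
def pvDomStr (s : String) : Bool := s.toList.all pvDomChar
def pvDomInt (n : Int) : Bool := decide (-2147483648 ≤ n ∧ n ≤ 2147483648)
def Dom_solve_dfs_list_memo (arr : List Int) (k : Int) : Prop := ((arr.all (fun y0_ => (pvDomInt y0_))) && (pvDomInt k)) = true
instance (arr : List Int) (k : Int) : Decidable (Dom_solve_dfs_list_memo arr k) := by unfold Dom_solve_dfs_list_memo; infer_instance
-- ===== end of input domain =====

-- B replaces the top-down memoized recursion by a bottom-up DP list built back-to-front (simpler, no recursion/memo table).

-- ===== PORT A =====
-- Port of A's recursive `_dfs` with the memo table threaded explicitly; `fuel` only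
-- bounds the recursion depth (the top call supplies arr.length + 1, which always suffices,
-- since every recursive call strictly increases start_idx).
-- `start`/`idx` are Nat because Python's start_idx is always ≥ 0 here; `min (start + k.toNat)`
-- is exact: the loop `range(start, end_idx)` is empty exactly when Python's is (k ≤ 0 clamps to empty).
-- `arr[idx]` / `table[start_idx]` are always in range, so `List.getD` / `List.set` are exact.
mutual
def pvDfsA (arr : List Int) (k : Int) : Nat → Nat → List Int → Int × List Int
  | 0, _, table => (0, table)
  | fuel+1, start, table =>
    if arr.length ≤ start then (0, table)
    else if table.getD start (-1) ≠ -1 then (table.getD start (-1), table)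
    else
      let endIdx := min (start + k.toNat) arr.length
      let r := pvLoopA arr k fuel start (List.range' start (endIdx - start)) 0 0 table
      (r.1, r.2.set start r.1)
  termination_by fuel _ _ => (fuel, 0)

def pvLoopA (arr : List Int) (k : Int) : Nat → Nat → List Nat → Int → Int → List Int → Int × List Int
  | _, _, [], _, answer, table => (answer, table)
  | fuel, start, idx :: rest, currMax, answer, table =>
    let cm := max currMax (arr.getD idx 0)
    let r := pvDfsA arr k fuel (idx+1) table
    pvLoopA arr k fuel start rest cm (max answer (cm * ((idx - start + 1 : Nat) : Int) + r.1)) r.2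
  termination_by fuel _ idxs _ _ _ => (fuel, idxs.length + 1)
end

def solve_dfs_list_memo (arr : List Int) (k : Int) : Int :=
  (pvDfsA arr k (arr.length + 1) 0 (List.replicate arr.length (-1))).1

-- ===== PORT B =====
-- One inner-loop step of Source B: state (curr_max, best), dp holds the answers for suffixes i+1 .. n.
def pvStepB (arr dp : List Int) (i : Nat) (p : Int × Int) (l : Nat) : Int × Int :=
  let cm := max p.1 (arr.getD (i + l - 1) 0)
  (cm, max p.2 (cm * (l : Int) + dp.getD (l - 1) 0))

-- Source B's outer loop: after m iterations dp = [dp[n-m], …, dp[n]]; row m+1 handles i = n-(m+1).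
def pvBuildDp (arr : List Int) (kk : Nat) : Nat → List Int
  | 0 => [0]
  | m+1 =>
    let dp := pvBuildDp arr kk m
    (((List.range' 1 (min kk (m+1))).foldl (pvStepB arr dp (arr.length - (m+1))) (0, 0)).2) :: dp

def solve_dfs_list_memo_alt (arr : List Int) (k : Int) : Int :=
  (pvBuildDp arr k.toNat arr.length).headD 0

-- ===== PRECONDITION & SPEC =====
def Spec_solve_dfs_list_memo (arr : List Int) (k : Int) (out : Int) : Prop := out = solve_dfs_list_memo_alt arr k
instance (arr : List Int) (k : Int) (out : Int) : Decidable (Spec_solve_dfs_list_memo arr k out) := by unfold Spec_solve_dfs_list_memo; infer_instance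

-- ===== CLAIM (what is proved, stated in full; the proofs are below) =====
def Claim_equal_solve_dfs_list_memo : Prop := ∀ (arr : List Int) (k : Int), Dom_solve_dfs_list_memo arr k → Spec_solve_dfs_list_memo arr k (solve_dfs_list_memo arr k)

-- ===== LEMMAS AND PROOFS =====

-- the DP value for suffix starting at i (0 for i ≥ arr.length)
def pvF (arr : List Int) (kk i : Nat) : Int := (pvBuildDp arr kk (arr.length - i)).headD 0

-- inner step with dp lookups replaced by pvF
def pvStepF (arr : List Int) (kk i : Nat) (p : Int × Int) (l : Nat) : Int × Int :=
  let cm := max p.1 (arr.getD (i + l - 1) 0)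
  (cm, max p.2 (cm * (l : Int) + pvF arr kk (i + l)))

-- A's loop step, written on the pure values
def pvStepP (arr : List Int) (kk start : Nat) (p : Int × Int) (idx : Nat) : Int × Int :=
  let cm := max p.1 (arr.getD idx 0)
  (cm, max p.2 (cm * ((idx - start + 1 : Nat) : Int) + pvF arr kk (idx + 1)))

theorem pvBuildDp_getD (arr : List Int) (kk : Nat) :
    ∀ m j, j ≤ m → (pvBuildDp arr kk m).getD j 0 = (pvBuildDp arr kk (m - j)).headD 0 := by
  intro m; induction m with
  | zero =>
    intro j hj
    have hj0 : j = 0 := by omega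
    subst hj0; rfl
  | succ m ih =>
    intro j hj
    cases j with
    | zero => rfl
    | succ j =>
      have h1 : (pvBuildDp arr kk (m+1)).getD (j+1) 0 = (pvBuildDp arr kk m).getD j 0 := by
        simp [pvBuildDp]
      have h2 : m + 1 - (j + 1) = m - j := by omega
      rw [h1, h2]
      exact ih j (by omega)

theorem pvF_rec (arr : List Int) (kk i : Nat) (hi : i < arr.length) :
    pvF arr kk i = ((List.range' 1 (min kk (arr.length - i))).foldl (pvStepF arr kk i) (0, 0)).2 := by
  have hm : arr.length - i = (arr.length - i - 1) + 1 := by omega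
  set m := arr.length - i - 1 with hmdef
  unfold pvF
  rw [hm]
  have hi' : arr.length - (m + 1) = i := by omega
  show ((List.range' 1 (min kk (m+1))).foldl (pvStepB arr (pvBuildDp arr kk m) (arr.length - (m+1))) (0, 0)).2 = _
  rw [hi']
  congr 1
  apply PySem.List.foldl_congr_mem
  intro p l hl
  have hl' : 1 ≤ l ∧ l < 1 + min kk (m+1) := by
    constructor
    · exact (List.mem_range'_1.mp hl).1
    · exact (List.mem_range'_1.mp hl).2
  unfold pvStepB pvStepF
  have hj : l - 1 ≤ m := by omega
  rw [pvBuildDp_getD arr kk m (l-1) hj]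
  unfold pvF
  have : m - (l - 1) = arr.length - (i + l) := by omega
  rw [this]

theorem pv_fold_shift (arr : List Int) (kk start : Nat) :
    ∀ c j p, (List.range' (start + j) c).foldl (pvStepP arr kk start) p
           = (List.range' (j + 1) c).foldl (pvStepF arr kk start) p := by
  intro c; induction c with
  | zero => intro j p; rfl
  | succ c ih =>
    intro j p
    rw [List.range'_succ, List.range'_succ]
    simp only [List.foldl_cons]
    have e1 : pvStepP arr kk start p (start + j) = pvStepF arr kk start p (j + 1) := by
      unfold pvStepP pvStepF
      have h1 : start + j - start + 1 = j + 1 := by omega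
      have h2 : start + (j + 1) - 1 = start + j := by omega
      have h3 : start + j + 1 = start + (j + 1) := by omega
      rw [h1, h2, h3]
    rw [e1]
    have h4 : start + j + 1 = start + (j + 1) := by omega
    rw [h4, ih (j+1)]

def pvGood (arr : List Int) (kk : Nat) (table : List Int) : Prop :=
  table.length = arr.length ∧
  ∀ j, j < arr.length → (table.getD j (-1) = -1 ∨ table.getD j (-1) = pvF arr kk j)

theorem pv_getD_set (table : List Int) (s : Nat) (v d : Int) (j : Nat) (hs : s < table.length) :
    (table.set s v).getD j d = if j = s then v else table.getD j d := by
  simp only [List.getD, List.getElem?_set]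
  split_ifs with h1 h2 h3 <;> try rfl
  · omega
  · omega

theorem pvF_of_ge (arr : List Int) (kk i : Nat) (h : arr.length ≤ i) : pvF arr kk i = 0 := by
  unfold pvF
  have : arr.length - i = 0 := by omega
  rw [this]; rfl

theorem pvDfsA_ok (arr : List Int) (k : Int) :
    ∀ fuel start table, pvGood arr k.toNat table → arr.length ≤ start + fuel →
      (pvDfsA arr k fuel start table).1 = pvF arr k.toNat start ∧
      pvGood arr k.toNat (pvDfsA arr k fuel start table).2 := by
  intro fuel
  induction fuel with
  | zero =>
    intro start table hg hf
    simp only [pvDfsA]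
    exact ⟨by rw [pvF_of_ge arr k.toNat start (by omega)], hg⟩
  | succ fuel ih =>
    intro start table hg hf
    by_cases hs : arr.length ≤ start
    · simp only [pvDfsA, if_pos hs]
      exact ⟨by rw [pvF_of_ge arr k.toNat start hs], hg⟩
    · rw [not_le] at hs
      simp only [pvDfsA, if_neg (by omega : ¬ arr.length ≤ start)]
      by_cases hm : table.getD start (-1) ≠ -1
      · rw [if_pos hm]
        rcases hg.2 start hs with h | h
        · exact absurd h hm
        · exact ⟨h, hg⟩
      · rw [if_neg hm]
        -- the loop
        have loop_ok : ∀ idxs cm ans tbl, pvGood arr k.toNat tbl →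
            (∀ idx ∈ idxs, arr.length ≤ idx + 1 + fuel) →
            (pvLoopA arr k fuel start idxs cm ans tbl).1 = (idxs.foldl (pvStepP arr k.toNat start) (cm, ans)).2 ∧
            pvGood arr k.toNat (pvLoopA arr k fuel start idxs cm ans tbl).2 := by
          intro idxs
          induction idxs with
          | nil =>
            intro cm ans tbl hg' _
            simp only [pvLoopA, List.foldl_nil]
            exact ⟨trivial, hg'⟩
          | cons idx rest ihl =>
            intro cm ans tbl hg' hb
            obtain ⟨h1, h2⟩ := ih (idx+1) tbl hg' (by have := hb idx (by simp); omega)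
            simp only [pvLoopA, List.foldl_cons, pvStepP]
            rw [h1]
            exact ihl _ _ _ h2 (fun i hi => hb i (List.mem_cons_of_mem _ hi))
        set endIdx := min (start + k.toNat) arr.length with he
        have hb : ∀ idx ∈ List.range' start (endIdx - start), arr.length ≤ idx + 1 + fuel := by
          intro idx hidx
          have := List.mem_range'_1.mp hidx
          omega
        obtain ⟨h1, h2⟩ := loop_ok (List.range' start (endIdx - start)) 0 0 table hg hb
        have hval : (pvLoopA arr k fuel start (List.range' start (endIdx - start)) 0 0 table).1
            = pvF arr k.toNat start := by
          rw [h1]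
          have hcnt : endIdx - start = min k.toNat (arr.length - start) := by omega
          have hsh := pv_fold_shift arr k.toNat start (endIdx - start) 0 (0, 0)
          rw [show start + 0 = start from rfl] at hsh
          rw [hsh, hcnt, ← pvF_rec arr k.toNat start hs]
        refine ⟨hval, ?_, ?_⟩
        · simp [h2.1]
        · intro j hj
          rw [pv_getD_set _ start _ _ j (by rw [h2.1]; exact hs)]
          split_ifs with hjs
          · subst hjs; right; exact hval
          · exact h2.2 j hj

theorem pvGood_init (arr : List Int) (kk : Nat) : pvGood arr kk (List.replicate arr.length (-1)) := by
  refine ⟨by simp, ?_⟩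
  intro j hj
  left
  simp [List.getD, hj]

-- ===== VERDICT (by name: the statement is the Claim_ definition above) =====
theorem solve_dfs_list_memo_spec : Claim_equal_solve_dfs_list_memo := by
  intro arr k _
  unfold Spec_solve_dfs_list_memo solve_dfs_list_memo solve_dfs_list_memo_alt
  obtain ⟨h1, _⟩ := pvDfsA_ok arr k (arr.length + 1) 0 (List.replicate arr.length (-1))
    (pvGood_init arr k.toNat) (by omega)
  rw [h1]
  unfold pvF
  rw [Nat.sub_zero]
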